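-- pv_equiv track=rewrite | github.com/acmeism/RosettaCodeData | Task/Truncatable-primes/Python/truncatable-primes.py | truncatableprime
-- ===== SOURCE A (Python) =====
-- def primes(n):
--     multiples = set()
--     prime = []
--     for i in range(2, n+1):
--         if i not in multiples:
--             prime.append(i)
--             multiples.update(set(range(i*i, n+1, i)))
--     return prime
--
-- def truncatableprime(n):
--     'Return a longest left and right truncatable primes below n'
--     primelist = [str(x) for x in primes(n)[::-1]]
--     primeset = set(primelist)
--     for n in primelist:
--         # n = 'abc'; [n[i:] for i in range(len(n))] -> ['abc', 'bc', 'c']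
--         alltruncs = set(n[i:] for i in range(len(n)))
--         if alltruncs.issubset(primeset):
--             truncateleft = int(n)
--             break
--     for n in primelist:
--         # n = 'abc'; [n[:i+1] for i in range(len(n))] -> ['a', 'ab', 'abc']
--         alltruncs = set([n[:i+1] for i in range(len(n))])
--         if alltruncs.issubset(primeset):
--             truncateright = int(n)
--             break
--     return truncateleft, truncateright
-- ===== SOURCE B (Python) =====
-- def truncatableprime(n):
--     'Return a longest left and right truncatable primes below n'
--     # Grow truncatable primes digit by digit instead of sieving all of [2, n]:
--     # a left (right) truncatable prime arises from a shorter one by prepending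
--     # (appending) a nonzero digit, so breadth-first generation finds them all.
--     def isprime(k):
--         if k < 2:
--             return False
--         d = 2
--         while d * d <= k:
--             if k % d == 0:
--                 return False
--             d += 1
--         return True
--
--     seeds = [p for p in (2, 3, 5, 7) if p <= n]
--     left = list(seeds)
--     lf = list(seeds)
--     right = list(seeds)
--     rf = list(seeds)
--     pow10 = 10
--     for _ in range(len(str(n)) - 1):
--         lf = [d * pow10 + v for v in lf for d in range(1, 10)
--               if d * pow10 + v <= n and isprime(d * pow10 + v)]
--         rf = [10 * v + d for v in rf for d in range(1, 10)
--               if 10 * v + d <= n and isprime(10 * v + d)]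
--         left += lf
--         right += rf
--         pow10 *= 10
--     return max(left), max(right)
-- ===== Notes on version B (the rewrite author's own statement) =====
-- stated objective: faster
-- what changed: Instead of sieving every integer in [2,n] and scanning prime strings for truncatable ones, B grows the left/right truncatable primes digit-by-digit (breadth-first: prepend/append a nonzero digit, keep those that are prime by trial division and <= n) and returns the maximum of each family.
import Mathlib
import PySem

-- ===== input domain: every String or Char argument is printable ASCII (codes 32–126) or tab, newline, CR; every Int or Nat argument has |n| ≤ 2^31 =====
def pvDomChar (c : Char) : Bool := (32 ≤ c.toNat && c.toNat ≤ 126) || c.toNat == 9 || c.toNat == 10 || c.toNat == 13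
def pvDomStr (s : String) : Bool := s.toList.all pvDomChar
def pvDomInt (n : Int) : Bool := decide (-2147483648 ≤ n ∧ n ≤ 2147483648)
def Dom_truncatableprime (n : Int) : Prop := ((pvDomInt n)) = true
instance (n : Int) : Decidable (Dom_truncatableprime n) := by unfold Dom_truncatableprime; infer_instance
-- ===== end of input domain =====

-- B replaces A's sieve of all of [2, n] plus string scans by digit-by-digit growth of the
-- truncatable primes themselves (prepend/append a nonzero digit, keep those that are prime
-- by trial division and <= n) and returns the maximum of each family (objective: faster).

-- ===== PORT A =====

-- primes(n): incremental sieve over range(2, n+1), tracking a set of known multiples.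
-- Python's 'multiples' is a hash set used only for membership tests and updates, so it is
-- modelled by Std.HashSet Int ('multiples.update(set(range(i*i, n+1, i)))' inserts each
-- element of the range); the list-backed PySem.Set would make this port unevaluable.
def pvSieveStep (n : Int) (st : Std.HashSet Int × List Int) (i : Int) :
    Std.HashSet Int × List Int :=
  if st.1.contains i then st
  else ((PySem.List.pyRange (i*i) (n+1) i).foldl (fun s m => s.insert m) st.1, st.2 ++ [i])

def pvPrimes (n : Int) : List Int :=
  ((PySem.List.pyRange 2 (n+1) 1).foldl (pvSieveStep n) (∅, [])).2

-- int(s): hand-ported positional digit fold (PySem.Int.ofStr?'s digit loop is a private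
-- definition a proof cannot reason about symbolically); exact on this port's inputs, which
-- are always canonical digit strings produced by str() of a nonnegative int.
def pvStrVal (s : String) : Int :=
  s.toList.foldl (fun a c => 10 * a + (((PySem.Int.digitVal? c).getD 0 : Nat) : Int)) 0

-- set(n[i:] for i in range(len(n))).issubset(primeset)
def pvCondL (s : String) (ps : PySem.Set String) : Bool :=
  (PySem.Set.ofList ((PySem.List.pyRange 0 (PySem.Str.len s) 1).map
    (fun i => PySem.Str.slice s (some i) none))).issubset ps

-- set(n[:i+1] for i in range(len(n))).issubset(primeset)
def pvCondR (s : String) (ps : PySem.Set String) : Bool :=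
  (PySem.Set.ofList ((PySem.List.pyRange 0 (PySem.Str.len s) 1).map
    (fun i => PySem.Str.slice s none (some (i + 1))))).issubset ps

-- the two for-loops with break (return 0 where Python would raise NameError, i.e. only for n < 2)
def pvScanL : List String → PySem.Set String → Int
  | [], _ => 0
  | s :: rest, ps => if pvCondL s ps then pvStrVal s else pvScanL rest ps

def pvScanR : List String → PySem.Set String → Int
  | [], _ => 0
  | s :: rest, ps => if pvCondR s ps then pvStrVal s else pvScanR rest ps

def truncatableprime (n : Int) : List Int :=
  let primelist := ((PySem.List.slice? (pvPrimes n) none none (-1)).getD []).map PySem.Int.toStr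
  let primeset := PySem.Set.ofList primelist
  [pvScanL primelist primeset, pvScanR primelist primeset]

-- ===== PORT B =====

-- while d * d <= k: if k % d == 0: return False; d += 1
def pvTrial (k d : Int) : Bool :=
  if h : d * d ≤ k then
    (if PySem.Int.mod k d = 0 then false else pvTrial k (d + 1))
  else true
termination_by (k + 1 - d).toNat
decreasing_by
  have hdk : d ≤ k := by
    by_cases h0 : d ≤ 0
    · nlinarith [mul_self_nonneg d]
    · nlinarith
  omega

def pvIsPrime (k : Int) : Bool := if k < 2 then false else pvTrial k 2

-- [d * pow10 + v for v in lf for d in range(1, 10) if d * pow10 + v <= n and isprime(...)]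
def pvGrowL (n pow10 : Int) (lf : List Int) : List Int :=
  lf.flatMap (fun v =>
    ((PySem.List.pyRange 1 10 1).filter
      (fun d => decide (d * pow10 + v ≤ n) && pvIsPrime (d * pow10 + v))).map
      (fun d => d * pow10 + v))

-- [10 * v + d for v in rf for d in range(1, 10) if 10 * v + d <= n and isprime(...)]
def pvGrowR (n : Int) (rf : List Int) : List Int :=
  rf.flatMap (fun v =>
    ((PySem.List.pyRange 1 10 1).filter
      (fun d => decide (10 * v + d ≤ n) && pvIsPrime (10 * v + d))).map
      (fun d => 10 * v + d))

def pvLoop (n : Int) (st : List Int × List Int × List Int × List Int × Int) (_i : Int) :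
    List Int × List Int × List Int × List Int × Int :=
  match st with
  | (lf, rf, left, right, pw) =>
    let lf' := pvGrowL n pw lf
    let rf' := pvGrowR n rf
    (lf', rf', left ++ lf', right ++ rf', pw * 10)

def truncatableprime_alt (n : Int) : List Int :=
  let seeds := [2, 3, 5, 7].filter (fun p => decide (p ≤ n))
  let st := (PySem.List.pyRange 0 (PySem.Str.len (PySem.Int.toStr n) - 1) 1).foldl
    (pvLoop n) (seeds, seeds, seeds, seeds, 10)
  [(PySem.List.max? st.2.2.1 (fun v => v)).getD 0,
   (PySem.List.max? st.2.2.2.1 (fun v => v)).getD 0]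

-- ===== PRECONDITION & SPEC =====
-- Python A raises NameError for n < 2 (no primes exist, so the loop variables are never bound);
-- B's Python likewise raises (max of an empty list) there.
def Pre_truncatableprime (n : Int) : Prop := 2 ≤ n
instance (n : Int) : Decidable (Pre_truncatableprime n) := by unfold Pre_truncatableprime; infer_instance
def pvWitness_truncatableprime : Int := 10

def Spec_truncatableprime (n : Int) (out : List Int) : Prop := out = truncatableprime_alt n
instance (n : Int) (out : List Int) : Decidable (Spec_truncatableprime n out) := by unfold Spec_truncatableprime; infer_instance

-- ===== CLAIM =====
def Claim_equal_truncatableprime : Prop :=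
  ∀ (n : Int), Dom_truncatableprime n → Pre_truncatableprime n → Spec_truncatableprime n (truncatableprime n)

-- ===== LEMMAS AND PROOFS =====

def pvPz (x : Int) : Prop := 2 ≤ x ∧ ∀ d : Int, 2 ≤ d → d * d ≤ x → ¬ d ∣ x

theorem pvTrial_iff (k d : Int) (hd : 2 ≤ d) :
    pvTrial k d = true ↔ ∀ e, d ≤ e → e * e ≤ k → ¬ e ∣ k := by
  fun_induction pvTrial k d with
  | case1 d h1 h2 =>
    simp only [Bool.false_eq_true, false_iff]
    intro hall
    exact absurd ((PySem.Int.mod_eq_zero_iff_dvd k d).mp h2) (hall d le_rfl h1)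
  | case2 d h1 h2 ih =>
    rw [ih (by omega)]
    constructor
    · intro h e he hee hdvd
      by_cases hed : e = d
      · subst hed; exact h2 ((PySem.Int.mod_eq_zero_iff_dvd k e).mpr hdvd)
      · exact h e (by omega) hee hdvd
    · intro h e he hee; exact h e (by omega) hee
  | case3 d h1 =>
    simp only [true_iff]
    intro e he hee hdvd
    nlinarith

theorem pvIsPrime_iff (k : Int) : pvIsPrime k = true ↔ pvPz k := by
  unfold pvIsPrime pvPz
  split_ifs with h
  · simp only [Bool.false_eq_true, false_iff]; intro ⟨h2, _⟩; omega
  · rw [pvTrial_iff k 2 le_rfl]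
    constructor
    · exact fun hh => ⟨by omega, fun d hd => hh d hd⟩
    · exact fun ⟨_, hh⟩ => hh

theorem pvPz_small_divisor (i : Int) (h2 : 2 ≤ i) :
    (∃ d, 2 ≤ d ∧ d * d ≤ i ∧ d ∣ i) ↔ ∃ p, pvPz p ∧ p < i ∧ p * p ≤ i ∧ p ∣ i := by
  constructor
  · rintro ⟨d, hd2, hdd, hdvd⟩
    classical
    have hPex : ∃ m : Nat, 2 ≤ m ∧ (m : Int) ∣ i := by
      refine ⟨d.toNat, by omega, ?_⟩
      rwa [Int.toNat_of_nonneg (by omega)]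
    obtain ⟨hp2, hpdvd⟩ := Nat.find_spec hPex
    set p := Nat.find hPex with hp
    have hmin : ∀ m : Nat, m < p → ¬(2 ≤ m ∧ (m : Int) ∣ i) := fun m hm => Nat.find_min hPex hm
    obtain ⟨f, hf⟩ := hpdvd
    have hppos : (0:Int) < (p:Int) := by exact_mod_cast by omega
    have hfpos : 0 < f := by nlinarith
    have hf2 : 2 ≤ f := by
      by_contra hc
      have hfeq : f = 1 := by omega
      have hip : i = (p : Int) := by rw [hf, hfeq, mul_one]
      have hdltp : d < (p : Int) := by nlinarith
      refine hmin d.toNat (by omega) ⟨by omega, ?_⟩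
      rwa [Int.toNat_of_nonneg (by omega)]
    have hple : (p : Int) ≤ f := by
      by_contra hc
      push_neg at hc
      refine hmin f.toNat (by omega) ⟨by omega, ?_⟩
      rw [Int.toNat_of_nonneg (by omega)]
      exact ⟨(p:Int), by rw [hf]; ring⟩
    refine ⟨(p:Int), ⟨by exact_mod_cast hp2, ?_⟩, by nlinarith, by nlinarith, ⟨f, hf⟩⟩
    intro g hg hgg hgdvd
    have hgi : g ∣ i := hgdvd.trans ⟨f, hf⟩
    have hgltp : g < (p:Int) := by nlinarith
    refine hmin g.toNat (by omega) ⟨by omega, ?_⟩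
    rwa [Int.toNat_of_nonneg (by omega)]
  · rintro ⟨p, hp, _, hpp, hpdvd⟩
    exact ⟨p, hp.1, hpp, hpdvd⟩

theorem pvMemFoldlInsert (L : List Int) (s : Std.HashSet Int) (m : Int) :
    m ∈ L.foldl (fun s x => s.insert x) s ↔ m ∈ s ∨ m ∈ L := by
  induction L generalizing s with
  | nil => simp
  | cons x L ih =>
    rw [List.foldl_cons, ih, Std.HashSet.mem_insert, beq_iff_eq, eq_comm, List.mem_cons]
    tauto

theorem pvSieve_inv (n : Int) : ∀ (j : Nat), 2 + (j:Int) ≤ n + 1 →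
    (((PySem.List.pyRange 2 (2 + (j:Int)) 1).foldl (pvSieveStep n) (∅, [])).2
      = (PySem.List.pyRange 2 (2 + (j:Int)) 1).filter pvIsPrime) ∧
    (∀ m : Int, m ∈ ((PySem.List.pyRange 2 (2 + (j:Int)) 1).foldl (pvSieveStep n) (∅, [])).1
      ↔ ∃ p, pvPz p ∧ p < 2 + (j:Int) ∧ p * p ≤ m ∧ m ≤ n ∧ p ∣ m) := by
  intro j
  induction j with
  | zero =>
    intro _
    rw [show ((0:Nat):Int) = 0 by rfl]
    rw [PySem.List.pyRange_one_eq_nil (by omega)]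
    refine ⟨rfl, fun m => ?_⟩
    simp only [List.foldl_nil]
    constructor
    · intro hm
      exact absurd hm (by rw [← Std.HashSet.contains_iff_mem, Std.HashSet.contains_empty]; simp)
    · rintro ⟨p, ⟨hp2, _⟩, hplt, _, _, _⟩; omega
  | succ j ih =>
    intro hle
    have hj : ((j+1 : Nat) : Int) = (j:Int) + 1 := by push_cast; ring
    have hk : 2 + ((j+1 : Nat) : Int) = (2 + (j:Int)) + 1 := by omega
    rw [hk, PySem.List.pyRange_one_succ_right (by omega), List.foldl_append, List.filter_append]
    set k := 2 + (j:Int) with hkdef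
    obtain ⟨ih1, ih2⟩ := ih (by omega)
    simp only [List.foldl_cons, List.foldl_nil]
    -- the scanned value k is in the multiples set iff it is composite
    have hkey : (((PySem.List.pyRange 2 k 1).foldl (pvSieveStep n)
        ((∅ : Std.HashSet Int), ([] : List Int))).1.contains k = true)
        ↔ ¬ pvPz k := by
      rw [Std.HashSet.contains_iff_mem, ih2 k]
      constructor
      · rintro ⟨p, hp, hplt, hpp, _, hpdvd⟩
        intro ⟨_, hall⟩
        exact hall p hp.1 hpp hpdvd
      · intro hnpz
        have hdiv : ∃ d, 2 ≤ d ∧ d * d ≤ k ∧ d ∣ k := by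
          by_contra hc
          push_neg at hc
          exact hnpz ⟨by omega, fun d hd hdd => hc d hd hdd⟩
        obtain ⟨p, hp, hplt, hpp, hpdvd⟩ := (pvPz_small_divisor k (by omega)).mp hdiv
        exact ⟨p, hp, hplt, hpp, by omega, hpdvd⟩
    rw [pvSieveStep]
    by_cases hc : (((PySem.List.pyRange 2 k 1).foldl (pvSieveStep n)
        ((∅ : Std.HashSet Int), ([] : List Int))).1.contains k = true)
    · -- composite: state unchanged
      have hnpz : ¬ pvPz k := hkey.mp hc
      have hprime : pvIsPrime k = false := by
        cases hb : pvIsPrime k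
        · rfl
        · exact absurd ((pvIsPrime_iff k).mp hb) hnpz
      rw [if_pos hc]
      refine ⟨by simp [ih1, hprime], fun m => ?_⟩
      rw [ih2 m]
      constructor
      · rintro ⟨p, hp, hplt, hpp, hmn, hpdvd⟩; exact ⟨p, hp, by omega, hpp, hmn, hpdvd⟩
      · rintro ⟨p, hp, hplt, hpp, hmn, hpdvd⟩
        refine ⟨p, hp, ?_, hpp, hmn, hpdvd⟩
        by_contra hpk
        have : p = k := by omega
        exact hnpz (this ▸ hp)
    · -- prime: append k, add its multiples
      have hpz : pvPz k := by
        by_contra hnpz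
        exact hc (hkey.mpr hnpz)
      have hprime : pvIsPrime k = true := (pvIsPrime_iff k).mpr hpz
      rw [if_neg hc]
      constructor
      · simp [ih1, hprime]
      · intro m
        rw [pvMemFoldlInsert, ih2 m, PySem.List.mem_pyRange_iff_of_pos (by omega)]
        constructor
        · rintro (⟨p, hp, hplt, hpp, hmn, hpdvd⟩ | ⟨hkk, hmlt, hdvd⟩)
          · exact ⟨p, hp, by omega, hpp, hmn, hpdvd⟩
          · refine ⟨k, hpz, by omega, hkk, by omega, ?_⟩
            simpa using dvd_add hdvd (⟨k, rfl⟩ : k ∣ k * k)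
        · rintro ⟨p, hp, hplt, hpp, hmn, hpdvd⟩
          by_cases hpk : p = k
          · subst hpk
            right
            refine ⟨hpp, by omega, ?_⟩
            exact dvd_sub hpdvd ⟨k, rfl⟩
          · exact Or.inl ⟨p, hp, by omega, hpp, hmn, hpdvd⟩

theorem pvPrimes_eq (n : Int) :
    pvPrimes n = (PySem.List.pyRange 2 (n + 1) 1).filter pvIsPrime := by
  by_cases hn : 2 ≤ n
  · have := (pvSieve_inv n (n - 1).toNat (by omega)).1
    rwa [show 2 + (((n-1).toNat : Nat) : Int) = n + 1 by omega] at this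
  · unfold pvPrimes
    rw [PySem.List.pyRange_one_eq_nil (by omega)]
    rfl

theorem pvPrimes_mem (n p : Int) : p ∈ pvPrimes n ↔ p ≤ n ∧ pvPz p := by
  rw [pvPrimes_eq, List.mem_filter, PySem.List.mem_pyRange_one]
  constructor
  · rintro ⟨⟨h1, h2⟩, h3⟩
    exact ⟨by omega, (pvIsPrime_iff p).mp h3⟩
  · rintro ⟨h1, h2⟩
    exact ⟨⟨h2.1, by omega⟩, (pvIsPrime_iff p).mpr h2⟩

def pvDigs (x : Int) : List Char := Nat.toDigits 10 x.toNat

def pvCVal (c : Char) : Int := (((PySem.Int.digitVal? c).getD 0 : Nat) : Int)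

def pvValC (cs : List Char) : Int := cs.foldl (fun a c => 10 * a + pvCVal c) 0

theorem pvCVal_digitChar (d : Nat) (hd : d ≤ 9) : pvCVal (Nat.digitChar d) = d := by
  interval_cases d <;> rfl

theorem pvValC_foldl (cs : List Char) (a : Int) :
    cs.foldl (fun a c => 10 * a + pvCVal c) a = a * 10 ^ cs.length + pvValC cs := by
  induction cs generalizing a with
  | nil => simp [pvValC]
  | cons c cs ih =>
    have h1 := ih (10 * a + pvCVal c)
    have h2 := ih (10 * 0 + pvCVal c)
    simp only [List.foldl_cons, List.length_cons]
    rw [h1]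
    conv_rhs => rw [pvValC, List.foldl_cons]
    rw [h2]
    ring

theorem pvValC_cons (c : Char) (cs : List Char) :
    pvValC (c :: cs) = pvCVal c * 10 ^ cs.length + pvValC cs := by
  rw [pvValC, List.foldl_cons, show (10 * (0:Int) + pvCVal c) = pvCVal c by ring, pvValC_foldl]

theorem pvValC_append_digit (cs : List Char) (c : Char) :
    pvValC (cs ++ [c]) = 10 * pvValC cs + pvCVal c := by
  rw [pvValC, List.foldl_append, List.foldl_cons, List.foldl_nil, ← pvValC]

theorem pvValC_toDigits (m : Nat) : pvValC (Nat.toDigits 10 m) = m := by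
  induction m using Nat.strong_induction_on with
  | _ m ih =>
    by_cases hm : m < 10
    · rw [Nat.toDigits_of_lt_base hm, pvValC, List.foldl_cons, List.foldl_nil]
      rw [show (10 * (0:Int) + pvCVal m.digitChar) = pvCVal m.digitChar by ring]
      rw [pvCVal_digitChar m (by omega)]
    · rw [Nat.toDigits_eq_if (by norm_num), if_neg hm, pvValC_append_digit,
        ih (m / 10) (by omega), pvCVal_digitChar (m % 10) (by omega)]
      push_cast
      omega

theorem pvDigs_inj (a b : Int) (ha : 0 ≤ a) (hb : 0 ≤ b) (h : pvDigs a = pvDigs b) : a = b := by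
  have := congrArg pvValC h
  rw [pvDigs, pvDigs, pvValC_toDigits, pvValC_toDigits] at this
  omega

theorem pvLen_eq_iff (v k : Nat) (hk : 1 ≤ k) :
    (Nat.toDigits 10 v).length = k ↔ v < 10 ^ k ∧ (k = 1 ∨ 10 ^ (k - 1) ≤ v) := by
  have h1 := Nat.length_toDigits_le_iff (b := 10) (n := v) (k := k) (by norm_num) (by omega)
  have hpos := Nat.length_toDigits_pos (b := 10) (n := v)
  by_cases hk1 : k = 1
  · subst hk1
    constructor
    · intro h; exact ⟨h1.mp (by omega), Or.inl rfl⟩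
    · rintro ⟨hv, _⟩; have := h1.mpr hv; omega
  · have h2 := Nat.length_toDigits_le_iff (b := 10) (n := v) (k := k - 1) (by norm_num) (by omega)
    constructor
    · intro h
      refine ⟨h1.mp (by omega), Or.inr ?_⟩
      by_contra hc
      push_neg at hc
      have := h2.mpr hc
      omega
    · rintro ⟨hv, hge | hge⟩
      · omega
      · have ha := h1.mpr hv
        have hb : ¬ (Nat.toDigits 10 v).length ≤ k - 1 := fun hh => by
          have := h2.mp hh; omega
        omega

theorem pvPrep (d v k : Nat) (hd1 : 1 ≤ d) (hd9 : d ≤ 9)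
    (hlen : (Nat.toDigits 10 v).length = k) :
    Nat.toDigits 10 (d * 10 ^ k + v) = Nat.digitChar d :: Nat.toDigits 10 v := by
  induction k generalizing v with
  | zero => have := Nat.length_toDigits_pos (b := 10) (n := v); omega
  | succ k ihk =>
    have hvlt : v < 10 ^ (k + 1) := ((pvLen_eq_iff v (k+1) (by omega)).mp hlen).1
    have hsplitpow : d * 10 ^ (k + 1) = (d * 10 ^ k) * 10 := by ring
    have hpowpos : 1 ≤ 10 ^ k := Nat.one_le_pow _ _ (by omega)
    have hnum : ¬ (d * 10 ^ (k + 1) + v < 10) := by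
      rw [hsplitpow]; nlinarith
    rw [Nat.toDigits_eq_if (by norm_num), if_neg hnum]
    have hdiv : (d * 10 ^ (k + 1) + v) / 10 = d * 10 ^ k + v / 10 := by
      rw [hsplitpow]; omega
    have hmod : (d * 10 ^ (k + 1) + v) % 10 = v % 10 := by
      rw [hsplitpow]; omega
    rw [hdiv, hmod]
    by_cases hk0 : k = 0
    · subst hk0
      have hv10 : v < 10 := by simpa using hvlt
      have hd0 : d * 10 ^ 0 + v / 10 = d := by simp; omega
      rw [hd0, Nat.toDigits_of_lt_base (by omega : d < 10),
        Nat.toDigits_of_lt_base hv10, Nat.mod_eq_of_lt hv10]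
      rfl
    · have hvge : 10 ^ k ≤ v := by
        rcases ((pvLen_eq_iff v (k+1) (by omega)).mp hlen).2 with h | h
        · omega
        · simpa using h
      have hv10 : 10 ≤ v := by
        have h10k : 10 ≤ 10 ^ k := by
          calc 10 = 10 ^ 1 := (pow_one 10).symm
          _ ≤ 10 ^ k := Nat.pow_le_pow_right (by omega) (by omega)
        omega
      have hsplit : Nat.toDigits 10 v = Nat.toDigits 10 (v / 10) ++ [(v % 10).digitChar] := by
        rw [Nat.toDigits_eq_if (b := 10) (n := v) (by norm_num), if_neg (by omega)]
      have hlen' : (Nat.toDigits 10 (v / 10)).length = k := by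
        have := congrArg List.length hsplit
        simp at this
        omega
      rw [ihk (v / 10) hlen', hsplit]
      rfl

theorem pvApp (v e : Nat) (hv : 1 ≤ v) (he : e < 10) :
    Nat.toDigits 10 (10 * v + e) = Nat.toDigits 10 v ++ [Nat.digitChar e] := by
  rw [← Nat.toDigits_append_toDigits (by norm_num) (by omega) he, Nat.toDigits_of_lt_base he]

theorem pvHead (m : Nat) (hm : 1 ≤ m) :
    ∃ d, 1 ≤ d ∧ d ≤ 9 ∧ (Nat.toDigits 10 m).head? = some (Nat.digitChar d) := by
  induction m using Nat.strong_induction_on with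
  | _ m ih =>
    by_cases hlt : m < 10
    · exact ⟨m, by omega, by omega, by rw [Nat.toDigits_of_lt_base hlt]; rfl⟩
    · obtain ⟨d, h1, h2, h3⟩ := ih (m / 10) (by omega) (by omega)
      refine ⟨d, h1, h2, ?_⟩
      rw [Nat.toDigits_eq_if (by norm_num), if_neg hlt]
      rw [List.head?_append_of_ne_nil]
      · exact h3
      · have := Nat.length_toDigits_pos (b := 10) (n := m / 10)
        exact List.ne_nil_of_length_pos this

-- ---- string side ----

def pvPrimeIn (n q : Int) : Prop := q ≤ n ∧ pvPz q

def pvGL (n x : Int) : Prop :=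
  0 ≤ x ∧ ∀ i : Nat, i < (pvDigs x).length →
    ∃ q, 0 ≤ q ∧ pvPrimeIn n q ∧ pvDigs q = (pvDigs x).drop i

def pvGR (n x : Int) : Prop :=
  0 ≤ x ∧ ∀ i : Nat, i < (pvDigs x).length →
    ∃ q, 0 ≤ q ∧ pvPrimeIn n q ∧ pvDigs q = (pvDigs x).take (i + 1)

theorem pvToChars_eq (p : Int) (hp : 0 ≤ p) : PySem.Int.toChars p = pvDigs p := by
  rw [PySem.Int.toChars, if_neg (by omega)]; rfl

theorem pvStrVal_toStr (p : Int) (hp : 0 ≤ p) : pvStrVal (PySem.Int.toStr p) = p := by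
  have : pvStrVal (PySem.Int.toStr p) = pvValC (PySem.Int.toStr p).toList := rfl
  rw [this, PySem.Int.toList_toStr, pvToChars_eq p hp, pvDigs, pvValC_toDigits]
  omega

def pvPrimeStrs (n : Int) : List String := ((pvPrimes n).reverse).map PySem.Int.toStr

theorem pvMemPrimeStrs (n : Int) (t : String) :
    t ∈ pvPrimeStrs n ↔ ∃ q : Int, 0 ≤ q ∧ pvPrimeIn n q ∧ pvDigs q = t.toList := by
  unfold pvPrimeStrs
  rw [List.mem_map]
  constructor
  · rintro ⟨q, hq, rfl⟩
    rw [List.mem_reverse, pvPrimes_mem] at hq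
    refine ⟨q, by have := hq.2.1; omega, ⟨hq.1, hq.2⟩, ?_⟩
    rw [PySem.Int.toList_toStr, pvToChars_eq q (by have := hq.2.1; omega)]
  · rintro ⟨q, hq0, ⟨hqn, hqz⟩, hdigs⟩
    refine ⟨q, ?_, ?_⟩
    · rw [List.mem_reverse, pvPrimes_mem]; exact ⟨hqn, hqz⟩
    · apply String.ext
      rw [PySem.Int.toList_toStr, pvToChars_eq q hq0, hdigs]

theorem pvCondL_iff (n p : Int) (hp : 0 ≤ p) :
    pvCondL (PySem.Int.toStr p) (PySem.Set.ofList (pvPrimeStrs n)) = true ↔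
      (∀ i : Nat, i < (pvDigs p).length →
        ∃ q, 0 ≤ q ∧ pvPrimeIn n q ∧ pvDigs q = (pvDigs p).drop i) := by
  unfold pvCondL
  rw [PySem.Set.issubset_iff]
  have hlen : PySem.Str.len (PySem.Int.toStr p) = ((pvDigs p).length : Int) := by
    rw [PySem.Str.len_eq, PySem.Int.toList_toStr, pvToChars_eq p hp]
  constructor
  · intro h iN hiN
    have hmem : PySem.Str.slice (PySem.Int.toStr p) (some (iN : Int)) none
        ∈ PySem.Set.ofList (pvPrimeStrs n) := by
      apply h
      rw [PySem.Set.mem_ofList, List.mem_map]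
      exact ⟨(iN : Int), by rw [PySem.List.mem_pyRange_one, hlen]; omega, rfl⟩
    rw [PySem.Set.mem_ofList, pvMemPrimeStrs] at hmem
    obtain ⟨q, hq0, hqin, hdigs⟩ := hmem
    refine ⟨q, hq0, hqin, ?_⟩
    rw [hdigs, PySem.Str.toList_slice, PySem.Chars.slice_eq_listSlice,
      PySem.Int.toList_toStr, pvToChars_eq p hp,
      PySem.List.slice_from _ (Int.natCast_nonneg iN)]
    simp
  · intro h x hx
    rw [PySem.Set.mem_ofList, List.mem_map] at hx
    obtain ⟨i, hi, rfl⟩ := hx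
    rw [PySem.List.mem_pyRange_one, hlen] at hi
    obtain ⟨q, hq0, hqin, hdigs⟩ := h i.toNat (by omega)
    rw [PySem.Set.mem_ofList, pvMemPrimeStrs]
    refine ⟨q, hq0, hqin, ?_⟩
    rw [hdigs, PySem.Str.toList_slice, PySem.Chars.slice_eq_listSlice,
      PySem.Int.toList_toStr, pvToChars_eq p hp, PySem.List.slice_from _ hi.1]

theorem pvCondR_iff (n p : Int) (hp : 0 ≤ p) :
    pvCondR (PySem.Int.toStr p) (PySem.Set.ofList (pvPrimeStrs n)) = true ↔
      (∀ i : Nat, i < (pvDigs p).length →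
        ∃ q, 0 ≤ q ∧ pvPrimeIn n q ∧ pvDigs q = (pvDigs p).take (i + 1)) := by
  unfold pvCondR
  rw [PySem.Set.issubset_iff]
  have hlen : PySem.Str.len (PySem.Int.toStr p) = ((pvDigs p).length : Int) := by
    rw [PySem.Str.len_eq, PySem.Int.toList_toStr, pvToChars_eq p hp]
  constructor
  · intro h iN hiN
    have hmem : PySem.Str.slice (PySem.Int.toStr p) none (some ((iN : Int) + 1))
        ∈ PySem.Set.ofList (pvPrimeStrs n) := by
      apply h
      rw [PySem.Set.mem_ofList, List.mem_map]
      exact ⟨(iN : Int), by rw [PySem.List.mem_pyRange_one, hlen]; omega, rfl⟩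
    rw [PySem.Set.mem_ofList, pvMemPrimeStrs] at hmem
    obtain ⟨q, hq0, hqin, hdigs⟩ := hmem
    refine ⟨q, hq0, hqin, ?_⟩
    have hb : (0:Int) ≤ (iN : Int) + 1 := by positivity
    rw [hdigs, PySem.Str.toList_slice, PySem.Chars.slice_eq_listSlice,
      PySem.Int.toList_toStr, pvToChars_eq p hp, PySem.List.slice_to _ hb]
    congr 1
  · intro h x hx
    rw [PySem.Set.mem_ofList, List.mem_map] at hx
    obtain ⟨i, hi, rfl⟩ := hx
    rw [PySem.List.mem_pyRange_one, hlen] at hi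
    obtain ⟨q, hq0, hqin, hdigs⟩ := h i.toNat (by omega)
    rw [PySem.Set.mem_ofList, pvMemPrimeStrs]
    refine ⟨q, hq0, hqin, ?_⟩
    have hb : (0:Int) ≤ i + 1 := by omega
    rw [hdigs, PySem.Str.toList_slice, PySem.Chars.slice_eq_listSlice,
      PySem.Int.toList_toStr, pvToChars_eq p hp, PySem.List.slice_to _ hb]
    congr 1
    omega

theorem pvScanL_spec (ps : PySem.Set String) (Q : Int → Prop) (g : Int) :
    ∀ l : List Int, l.Pairwise (fun a b => b < a) → (∀ x ∈ l, 0 ≤ x) → g ∈ l →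
    (∀ p ∈ l, (pvCondL (PySem.Int.toStr p) ps = true ↔ Q p)) → Q g →
    (∀ p ∈ l, Q p → p ≤ g) → pvScanL (l.map PySem.Int.toStr) ps = g := by
  intro l
  induction l with
  | nil => intro _ _ hg; exact absurd hg (List.not_mem_nil)
  | cons p rest ih =>
    intro hdesc hpos hg hcond hQg hmax
    rw [List.map_cons, pvScanL]
    by_cases hc : pvCondL (PySem.Int.toStr p) ps = true
    · rw [if_pos hc, pvStrVal_toStr p (hpos p (by simp))]
      have hQp : Q p := (hcond p (by simp)).mp hc
      have hple : p ≤ g := hmax p (by simp) hQp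
      rcases List.mem_cons.mp hg with rfl | hgrest
      · rfl
      · have : g < p := (List.pairwise_cons.mp hdesc).1 g hgrest
        omega
    · rw [if_neg hc]
      have hgrest : g ∈ rest := by
        rcases List.mem_cons.mp hg with rfl | h
        · exact absurd ((hcond g (by simp)).mpr hQg) hc
        · exact h
      exact ih (List.pairwise_cons.mp hdesc).2 (fun x hx => hpos x (by simp [hx]))
        hgrest (fun q hq => hcond q (by simp [hq])) hQg (fun q hq => hmax q (by simp [hq]))

theorem pvScanR_spec (ps : PySem.Set String) (Q : Int → Prop) (g : Int) :
    ∀ l : List Int, l.Pairwise (fun a b => b < a) → (∀ x ∈ l, 0 ≤ x) → g ∈ l →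
    (∀ p ∈ l, (pvCondR (PySem.Int.toStr p) ps = true ↔ Q p)) → Q g →
    (∀ p ∈ l, Q p → p ≤ g) → pvScanR (l.map PySem.Int.toStr) ps = g := by
  intro l
  induction l with
  | nil => intro _ _ hg; exact absurd hg (List.not_mem_nil)
  | cons p rest ih =>
    intro hdesc hpos hg hcond hQg hmax
    rw [List.map_cons, pvScanR]
    by_cases hc : pvCondR (PySem.Int.toStr p) ps = true
    · rw [if_pos hc, pvStrVal_toStr p (hpos p (by simp))]
      have hQp : Q p := (hcond p (by simp)).mp hc
      have hple : p ≤ g := hmax p (by simp) hQp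
      rcases List.mem_cons.mp hg with rfl | hgrest
      · rfl
      · have : g < p := (List.pairwise_cons.mp hdesc).1 g hgrest
        omega
    · rw [if_neg hc]
      have hgrest : g ∈ rest := by
        rcases List.mem_cons.mp hg with rfl | h
        · exact absurd ((hcond g (by simp)).mpr hQg) hc
        · exact h
      exact ih (List.pairwise_cons.mp hdesc).2 (fun x hx => hpos x (by simp [hx]))
        hgrest (fun q hq => hcond q (by simp [hq])) hQg (fun q hq => hmax q (by simp [hq]))

theorem pvLen_one (x : Int) (hx : 0 ≤ x) : (pvDigs x).length = 1 ↔ x < 10 := by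
  rw [pvDigs, pvLen_eq_iff x.toNat 1 le_rfl]
  constructor
  · rintro ⟨h, _⟩; omega
  · intro h; exact ⟨by omega, Or.inl rfl⟩

theorem pvPz_single (x : Int) (h0 : 0 ≤ x) (h10 : x < 10) :
    pvPz x ↔ x = 2 ∨ x = 3 ∨ x = 5 ∨ x = 7 := by
  constructor
  · rintro ⟨h2, h⟩
    by_contra hc
    push_neg at hc
    have hx : x = 4 ∨ x = 6 ∨ x = 8 ∨ x = 9 := by omega
    rcases hx with rfl | rfl | rfl | rfl
    · exact h 2 (by norm_num) (by norm_num) (by omega)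
    · exact h 2 (by norm_num) (by norm_num) (by omega)
    · exact h 2 (by norm_num) (by norm_num) (by omega)
    · exact h 3 (by norm_num) (by norm_num) (by omega)
  · intro hx
    have h2 : 2 ≤ x := by omega
    refine ⟨h2, fun d hd hdd hdvd => ?_⟩
    have hd3 : d ≤ 3 := by nlinarith
    interval_cases d
    · rcases hx with rfl | rfl | rfl | rfl <;> omega
    · rcases hx with rfl | rfl | rfl | rfl <;> omega

theorem pvGL_single (n x : Int) (hx : 0 ≤ x) (hlen : (pvDigs x).length = 1) :
    pvGL n x ↔ x ≤ n ∧ pvPz x := by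
  constructor
  · rintro ⟨_, h⟩
    obtain ⟨q, hq0, hqin, hdigs⟩ := h 0 (by omega)
    rw [List.drop_zero] at hdigs
    have := pvDigs_inj q x hq0 hx hdigs
    subst this
    exact hqin
  · rintro ⟨h1, h2⟩
    refine ⟨hx, fun i hi => ?_⟩
    have : i = 0 := by omega
    subst this
    exact ⟨x, hx, ⟨h1, h2⟩, by rw [List.drop_zero]⟩

theorem pvGR_single (n x : Int) (hx : 0 ≤ x) (hlen : (pvDigs x).length = 1) :
    pvGR n x ↔ x ≤ n ∧ pvPz x := by
  constructor
  · rintro ⟨_, h⟩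
    obtain ⟨q, hq0, hqin, hdigs⟩ := h 0 (by omega)
    rw [List.take_of_length_le (by omega)] at hdigs
    have := pvDigs_inj q x hq0 hx hdigs
    subst this
    exact hqin
  · rintro ⟨h1, h2⟩
    refine ⟨hx, fun i hi => ?_⟩
    have : i = 0 := by omega
    subst this
    exact ⟨x, hx, ⟨h1, h2⟩, by rw [List.take_of_length_le (by omega)]⟩

theorem pvGR_pos (n v : Int) (h0 : 0 ≤ v) (h : pvGR n v) : 1 ≤ v := by
  by_contra hc
  push_neg at hc
  have hveq : v = 0 := by omega
  subst hveq
  obtain ⟨q, hq0, hqin, hqd⟩ := h.2 0 (by rw [pvDigs]; exact Nat.length_toDigits_pos)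
  have h00 : pvDigs (0:Int) = ['0'] := by decide
  rw [h00] at hqd
  simp at hqd
  have hq00 : q = 0 := pvDigs_inj q 0 hq0 le_rfl (by rw [hqd, h00])
  subst hq00
  have := hqin.2.1
  omega

theorem pvDigs_cons (x d v : Int) (k : Nat) (hx : 0 ≤ x) (hv : 0 ≤ v)
    (hd1 : 1 ≤ d) (hd9 : d ≤ 9) (hxe : x = d * 10 ^ k + v)
    (hlenv : (pvDigs v).length = k) :
    pvDigs x = Nat.digitChar d.toNat :: pvDigs v := by
  have hd' : ((d.toNat : Nat) : Int) = d := Int.toNat_of_nonneg (by omega)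
  have hv' : ((v.toNat : Nat) : Int) = v := Int.toNat_of_nonneg hv
  have hcast : ((d.toNat * 10 ^ k + v.toNat : Nat) : Int) = x := by
    push_cast
    rw [hd', hv', hxe]
  have hxt : x.toNat = d.toNat * 10 ^ k + v.toNat := by omega
  rw [pvDigs] at hlenv
  rw [pvDigs, hxt]
  exact pvPrep d.toNat v.toNat k (by omega) (by omega) hlenv

theorem pvGL_step (n x : Int) (k : Nat) (hk : 1 ≤ k) (hx : 0 ≤ x)
    (hlen : (pvDigs x).length = k + 1) :
    pvGL n x ↔ (x ≤ n ∧ pvPz x ∧ ∃ d v : Int, 1 ≤ d ∧ d ≤ 9 ∧ 0 ≤ v ∧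
      (pvDigs v).length = k ∧ pvGL n v ∧ x = d * 10 ^ k + v) := by
  constructor
  · rintro ⟨_, h⟩
    obtain ⟨q0, hq00, hq0in, hq0digs⟩ := h 0 (by omega)
    rw [List.drop_zero] at hq0digs
    have hq0in' : pvPrimeIn n x := by
      rwa [pvDigs_inj q0 x hq00 hx hq0digs] at hq0in
    obtain ⟨v, hv0, hvin, hvdigs⟩ := h 1 (by omega)
    have hlenv : (pvDigs v).length = k := by
      rw [hvdigs, List.length_drop, hlen]
      omega
    have hGLv : pvGL n v := by
      refine ⟨hv0, fun i hi => ?_⟩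
      obtain ⟨q, hq0', hqin', hqdigs'⟩ := h (i + 1) (by rw [hlen]; rw [hlenv] at hi; omega)
      refine ⟨q, hq0', hqin', ?_⟩
      rw [hqdigs', hvdigs, List.drop_drop, Nat.add_comm]
    -- leading digit
    have hx1 : 1 ≤ x.toNat := by
      by_contra hc
      have hx0 : x.toNat = 0 := by omega
      have : (pvDigs x).length = 1 := by rw [pvDigs, hx0]; rfl
      omega
    obtain ⟨d, hd1, hd9, hdhead⟩ := pvHead x.toNat hx1
    have hne : pvDigs x ≠ [] := by
      intro hc; rw [hc] at hlen; simp at hlen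
    obtain ⟨c, cs, hcons⟩ : ∃ c cs, pvDigs x = c :: cs := by
      cases hpd : pvDigs x with
      | nil => exact absurd hpd hne
      | cons c cs => exact ⟨c, cs, rfl⟩
    have hdh2 : (pvDigs x).head? = some (Nat.digitChar d) := hdhead
    rw [hcons] at hdh2
    have hc : c = Nat.digitChar d := by
      simpa using hdh2
    have hcs : cs = pvDigs v := by
      have hdr : (pvDigs x).drop 1 = cs := by rw [hcons]; rfl
      rw [← hvdigs] at hdr
      exact hdr.symm
    have hsplit : pvDigs x = Nat.digitChar d :: pvDigs v := by
      rw [hcons, hc, hcs]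
    have hval : x = (d : Int) * 10 ^ k + v := by
      have h1 : pvValC (pvDigs x) = (x.toNat : Int) := by rw [pvDigs, pvValC_toDigits]
      have h2 : pvValC (pvDigs v) = (v.toNat : Int) := by rw [pvDigs, pvValC_toDigits]
      rw [hsplit, pvValC_cons, pvCVal_digitChar d (by omega), h2, hlenv] at h1
      rw [Int.toNat_of_nonneg hx, Int.toNat_of_nonneg hv0] at h1
      exact h1.symm
    exact ⟨hq0in'.1, hq0in'.2, (d:Int), v, by exact_mod_cast hd1, by exact_mod_cast hd9,
      hv0, hlenv, hGLv, hval⟩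
  · rintro ⟨hxn, hxpz, d, v, hd1, hd9, hv0, hlenv, ⟨_, hGLv⟩, hxe⟩
    have hsplit := pvDigs_cons x d v k hx hv0 hd1 hd9 hxe hlenv
    refine ⟨hx, fun i hi => ?_⟩
    rcases Nat.eq_zero_or_pos i with rfl | hipos
    · exact ⟨x, hx, ⟨hxn, hxpz⟩, by rw [List.drop_zero]⟩
    · obtain ⟨q, hq0, hqin, hqdigs⟩ := hGLv (i - 1) (by rw [hlen] at hi; omega)
      refine ⟨q, hq0, hqin, ?_⟩
      rw [hqdigs, hsplit]
      rw [show i = (i - 1) + 1 by omega, List.drop_succ_cons]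
      congr 1

theorem pvDigs_snoc (x v e : Int) (hv : 1 ≤ v) (he0 : 0 ≤ e) (he : e < 10)
    (hxe : x = 10 * v + e) :
    pvDigs x = pvDigs v ++ [Nat.digitChar e.toNat] := by
  have hxt : x.toNat = 10 * v.toNat + e.toNat := by omega
  rw [pvDigs, hxt]
  exact pvApp v.toNat e.toNat (by omega) (by omega)

theorem pvGR_step (n x : Int) (k : Nat) (hk : 1 ≤ k) (hx : 0 ≤ x)
    (hlen : (pvDigs x).length = k + 1) :
    pvGR n x ↔ (x ≤ n ∧ pvPz x ∧ ∃ d v : Int, 1 ≤ d ∧ d ≤ 9 ∧ 0 ≤ v ∧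
      (pvDigs v).length = k ∧ pvGR n v ∧ x = 10 * v + d) := by
  have hx10 : 10 ≤ x.toNat := by
    have hh := (pvLen_eq_iff x.toNat (k+1) (by omega)).mp hlen
    rcases hh.2 with h | h
    · omega
    · have h10 : 10 ≤ 10 ^ (k + 1 - 1) := by
        calc 10 = 10 ^ 1 := (pow_one 10).symm
        _ ≤ 10 ^ (k + 1 - 1) := Nat.pow_le_pow_right (by omega) (by omega)
      omega
  have hsplit0 : pvDigs x = Nat.toDigits 10 (x.toNat / 10) ++ [(x.toNat % 10).digitChar] := by
    rw [pvDigs, Nat.toDigits_eq_if (by norm_num), if_neg (by omega)]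
  have hlenq : (Nat.toDigits 10 (x.toNat / 10)).length = k := by
    have := congrArg List.length hsplit0
    simp at this
    omega
  constructor
  · rintro ⟨_, h⟩
    obtain ⟨qf, hqf0, hqfin, hqfdigs⟩ := h k (by omega)
    rw [List.take_of_length_le (by omega)] at hqfdigs
    have hqfin' : pvPrimeIn n x := by
      rwa [pvDigs_inj qf x hqf0 hx hqfdigs] at hqfin
    obtain ⟨v, hv0, hvin, hvdigs⟩ := h (k - 1) (by omega)
    have hvtake : pvDigs v = Nat.toDigits 10 (x.toNat / 10) := by
      rw [hvdigs, hsplit0, show k - 1 + 1 = k by omega,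
        List.take_append_of_le_length (by omega), List.take_of_length_le (by omega)]
    have hGRv : pvGR n v := by
      refine ⟨hv0, fun i hi => ?_⟩
      obtain ⟨q, hq0', hqin', hqdigs'⟩ := h i (by rw [hvtake, hlenq] at hi; omega)
      refine ⟨q, hq0', hqin', ?_⟩
      rw [hqdigs', hvtake, hsplit0,
        List.take_append_of_le_length (by rw [hvtake, hlenq] at hi; omega)]
    have hd0 : 1 ≤ x % 10 := by
      by_contra hc
      push_neg at hc
      have hm0 : x % 10 = 0 := by omega
      have h2 : (2:Int) ∣ x := by omega
      exact hqfin'.2.2 2 (by omega) (by omega) h2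
    refine ⟨hqfin'.1, hqfin'.2, x % 10, v, hd0, by omega, hv0, by rw [hvtake]; exact hlenq,
      hGRv, ?_⟩
    have hveq : v = ((x.toNat / 10 : Nat) : Int) := by
      apply pvDigs_inj v _ hv0 (by positivity)
      rw [hvtake]
      rfl
    omega
  · rintro ⟨hxn, hxpz, d, v, hd1, hd9, hv0, hlenv, hGRfull, hxe⟩
    have hGRv := hGRfull.2
    have hv1 : 1 ≤ v := pvGR_pos n v hv0 hGRfull
    have hsplit : pvDigs x = pvDigs v ++ [Nat.digitChar d.toNat] :=
      pvDigs_snoc x v d hv1 (by omega) (by omega) hxe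
    refine ⟨hx, fun i hi => ?_⟩
    by_cases hik : i = k
    · subst hik
      exact ⟨x, hx, ⟨hxn, hxpz⟩, by rw [List.take_of_length_le (by omega)]⟩
    · obtain ⟨q, hq0, hqin, hqdigs⟩ := hGRv i (by rw [hlen] at hi; rw [hlenv]; omega)
      refine ⟨q, hq0, hqin, ?_⟩
      rw [hqdigs, hsplit, List.take_append_of_le_length (by rw [hlenv]; rw [hlen] at hi; omega)]

theorem pvGrowL_mem (n pw : Int) (lf : List Int) (x : Int) :
    x ∈ pvGrowL n pw lf ↔ ∃ v ∈ lf, ∃ d : Int, 1 ≤ d ∧ d ≤ 9 ∧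
      x = d * pw + v ∧ x ≤ n ∧ pvIsPrime x = true := by
  unfold pvGrowL
  rw [List.mem_flatMap]
  constructor
  · rintro ⟨v, hv, hx⟩
    rw [List.mem_map] at hx
    obtain ⟨d, hd, rfl⟩ := hx
    rw [List.mem_filter, PySem.List.mem_pyRange_one] at hd
    obtain ⟨⟨hd1, hd10⟩, hcond⟩ := hd
    rw [Bool.and_eq_true, decide_eq_true_eq] at hcond
    exact ⟨v, hv, d, hd1, by omega, rfl, hcond.1, hcond.2⟩
  · rintro ⟨v, hv, d, hd1, hd9, rfl, hxn, hxp⟩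
    refine ⟨v, hv, ?_⟩
    rw [List.mem_map]
    refine ⟨d, ?_, rfl⟩
    rw [List.mem_filter, PySem.List.mem_pyRange_one]
    exact ⟨⟨hd1, by omega⟩, by rw [Bool.and_eq_true, decide_eq_true_eq]; exact ⟨hxn, hxp⟩⟩

theorem pvGrowR_mem (n : Int) (rf : List Int) (x : Int) :
    x ∈ pvGrowR n rf ↔ ∃ v ∈ rf, ∃ d : Int, 1 ≤ d ∧ d ≤ 9 ∧
      x = 10 * v + d ∧ x ≤ n ∧ pvIsPrime x = true := by
  unfold pvGrowR
  rw [List.mem_flatMap]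
  constructor
  · rintro ⟨v, hv, hx⟩
    rw [List.mem_map] at hx
    obtain ⟨d, hd, rfl⟩ := hx
    rw [List.mem_filter, PySem.List.mem_pyRange_one] at hd
    obtain ⟨⟨hd1, hd10⟩, hcond⟩ := hd
    rw [Bool.and_eq_true, decide_eq_true_eq] at hcond
    exact ⟨v, hv, d, hd1, by omega, rfl, hcond.1, hcond.2⟩
  · rintro ⟨v, hv, d, hd1, hd9, rfl, hxn, hxp⟩
    refine ⟨v, hv, ?_⟩
    rw [List.mem_map]
    refine ⟨d, ?_, rfl⟩
    rw [List.mem_filter, PySem.List.mem_pyRange_one]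
    exact ⟨⟨hd1, by omega⟩, by rw [Bool.and_eq_true, decide_eq_true_eq]; exact ⟨hxn, hxp⟩⟩

theorem pvSeedsL_mem (n x : Int) :
    x ∈ [2, 3, 5, 7].filter (fun p => decide (p ≤ n)) ↔
      0 ≤ x ∧ pvGL n x ∧ (pvDigs x).length = 1 := by
  rw [List.mem_filter, decide_eq_true_eq]
  constructor
  · rintro ⟨hmem, hle⟩
    have hx : x = 2 ∨ x = 3 ∨ x = 5 ∨ x = 7 := by
      simpa using hmem
    have h0 : 0 ≤ x := by omega
    have h10 : x < 10 := by omega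
    have hlen : (pvDigs x).length = 1 := (pvLen_one x h0).mpr h10
    exact ⟨h0, (pvGL_single n x h0 hlen).mpr ⟨hle, (pvPz_single x h0 h10).mpr hx⟩, hlen⟩
  · rintro ⟨h0, hGL, hlen⟩
    have h10 : x < 10 := (pvLen_one x h0).mp hlen
    obtain ⟨hle, hpz⟩ := (pvGL_single n x h0 hlen).mp hGL
    have := (pvPz_single x h0 h10).mp hpz
    exact ⟨by simpa using this, hle⟩

theorem pvSeedsR_mem (n x : Int) :
    x ∈ [2, 3, 5, 7].filter (fun p => decide (p ≤ n)) ↔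
      0 ≤ x ∧ pvGR n x ∧ (pvDigs x).length = 1 := by
  rw [List.mem_filter, decide_eq_true_eq]
  constructor
  · rintro ⟨hmem, hle⟩
    have hx : x = 2 ∨ x = 3 ∨ x = 5 ∨ x = 7 := by
      simpa using hmem
    have h0 : 0 ≤ x := by omega
    have h10 : x < 10 := by omega
    have hlen : (pvDigs x).length = 1 := (pvLen_one x h0).mpr h10
    exact ⟨h0, (pvGR_single n x h0 hlen).mpr ⟨hle, (pvPz_single x h0 h10).mpr hx⟩, hlen⟩
  · rintro ⟨h0, hGR, hlen⟩
    have h10 : x < 10 := (pvLen_one x h0).mp hlen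
    obtain ⟨hle, hpz⟩ := (pvGR_single n x h0 hlen).mp hGR
    have := (pvPz_single x h0 h10).mp hpz
    exact ⟨by simpa using this, hle⟩

theorem pvLoop_inv (n : Int) (t : Nat) :
    (((PySem.List.pyRange 0 (t:Int) 1).foldl (pvLoop n)
        ([2, 3, 5, 7].filter (fun p => decide (p ≤ n)),
         [2, 3, 5, 7].filter (fun p => decide (p ≤ n)),
         [2, 3, 5, 7].filter (fun p => decide (p ≤ n)),
         [2, 3, 5, 7].filter (fun p => decide (p ≤ n)), 10)).2.2.2.2 = (10:Int) ^ (t + 1)) ∧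
    (∀ x, x ∈ ((PySem.List.pyRange 0 (t:Int) 1).foldl (pvLoop n)
        ([2, 3, 5, 7].filter (fun p => decide (p ≤ n)),
         [2, 3, 5, 7].filter (fun p => decide (p ≤ n)),
         [2, 3, 5, 7].filter (fun p => decide (p ≤ n)),
         [2, 3, 5, 7].filter (fun p => decide (p ≤ n)), 10)).1
      ↔ 0 ≤ x ∧ pvGL n x ∧ (pvDigs x).length = t + 1) ∧
    (∀ x, x ∈ ((PySem.List.pyRange 0 (t:Int) 1).foldl (pvLoop n)
        ([2, 3, 5, 7].filter (fun p => decide (p ≤ n)),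
         [2, 3, 5, 7].filter (fun p => decide (p ≤ n)),
         [2, 3, 5, 7].filter (fun p => decide (p ≤ n)),
         [2, 3, 5, 7].filter (fun p => decide (p ≤ n)), 10)).2.1
      ↔ 0 ≤ x ∧ pvGR n x ∧ (pvDigs x).length = t + 1) ∧
    (∀ x, x ∈ ((PySem.List.pyRange 0 (t:Int) 1).foldl (pvLoop n)
        ([2, 3, 5, 7].filter (fun p => decide (p ≤ n)),
         [2, 3, 5, 7].filter (fun p => decide (p ≤ n)),
         [2, 3, 5, 7].filter (fun p => decide (p ≤ n)),
         [2, 3, 5, 7].filter (fun p => decide (p ≤ n)), 10)).2.2.1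
      ↔ 0 ≤ x ∧ pvGL n x ∧ (pvDigs x).length ≤ t + 1) ∧
    (∀ x, x ∈ ((PySem.List.pyRange 0 (t:Int) 1).foldl (pvLoop n)
        ([2, 3, 5, 7].filter (fun p => decide (p ≤ n)),
         [2, 3, 5, 7].filter (fun p => decide (p ≤ n)),
         [2, 3, 5, 7].filter (fun p => decide (p ≤ n)),
         [2, 3, 5, 7].filter (fun p => decide (p ≤ n)), 10)).2.2.2.1
      ↔ 0 ≤ x ∧ pvGR n x ∧ (pvDigs x).length ≤ t + 1) := by
  induction t with
  | zero =>
    rw [show ((0:Nat):Int) = 0 by rfl, PySem.List.pyRange_one_eq_nil le_rfl]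
    simp only [List.foldl_nil]
    refine ⟨by norm_num, ?_, ?_, ?_, ?_⟩
    · intro x; exact pvSeedsL_mem n x
    · intro x; exact pvSeedsR_mem n x
    · intro x
      rw [pvSeedsL_mem n x]
      constructor
      · rintro ⟨h0, hGL, hlen⟩; exact ⟨h0, hGL, by omega⟩
      · rintro ⟨h0, hGL, hlen⟩
        have := Nat.length_toDigits_pos (b := 10) (n := x.toNat)
        exact ⟨h0, hGL, by rw [pvDigs] at hlen ⊢; omega⟩
    · intro x
      rw [pvSeedsR_mem n x]
      constructor
      · rintro ⟨h0, hGR, hlen⟩; exact ⟨h0, hGR, by omega⟩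
      · rintro ⟨h0, hGR, hlen⟩
        have := Nat.length_toDigits_pos (b := 10) (n := x.toNat)
        exact ⟨h0, hGR, by rw [pvDigs] at hlen ⊢; omega⟩
  | succ t ih =>
    obtain ⟨ihpw, ihlf, ihrf, ihleft, ihright⟩ := ih
    rw [show ((t+1:Nat):Int) = (t:Int) + 1 by push_cast; ring,
      PySem.List.pyRange_one_succ_right (by positivity), List.foldl_append,
      List.foldl_cons, List.foldl_nil]
    set st := ((PySem.List.pyRange 0 (t:Int) 1).foldl (pvLoop n)
        ([2, 3, 5, 7].filter (fun p => decide (p ≤ n)),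
         [2, 3, 5, 7].filter (fun p => decide (p ≤ n)),
         [2, 3, 5, 7].filter (fun p => decide (p ≤ n)),
         [2, 3, 5, 7].filter (fun p => decide (p ≤ n)), 10)) with hst
    have hlfmem : ∀ x, x ∈ pvGrowL n st.2.2.2.2 st.1 ↔
        0 ≤ x ∧ pvGL n x ∧ (pvDigs x).length = t + 2 := by
      intro x
      rw [pvGrowL_mem, ihpw]
      constructor
      · rintro ⟨v, hv, d, hd1, hd9, rfl, hxn, hxp⟩
        obtain ⟨hv0, hGLv, hlenv⟩ := (ihlf v).mp hv
        have hx0 : 0 ≤ d * 10 ^ (t+1) + v := by positivity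
        have hsplit := pvDigs_cons _ d v (t+1) hx0 hv0 hd1 hd9 rfl hlenv
        have hlenx : (pvDigs (d * 10 ^ (t+1) + v)).length = t + 2 := by
          rw [hsplit, List.length_cons, hlenv]
        refine ⟨hx0, ?_, hlenx⟩
        rw [pvGL_step n _ (t+1) (by omega) hx0 hlenx]
        exact ⟨hxn, (pvIsPrime_iff _).mp hxp, d, v, hd1, hd9, hv0, hlenv, hGLv, rfl⟩
      · rintro ⟨hx0, hGLx, hlenx⟩
        obtain ⟨hxn, hxpz, d, v, hd1, hd9, hv0, hlenv, hGLv, hxe⟩ :=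
          (pvGL_step n x (t+1) (by omega) hx0 hlenx).mp hGLx
        exact ⟨v, (ihlf v).mpr ⟨hv0, hGLv, hlenv⟩, d, hd1, hd9, hxe,
          hxn, (pvIsPrime_iff x).mpr hxpz⟩
    have hrfmem : ∀ x, x ∈ pvGrowR n st.2.1 ↔
        0 ≤ x ∧ pvGR n x ∧ (pvDigs x).length = t + 2 := by
      intro x
      rw [pvGrowR_mem]
      constructor
      · rintro ⟨v, hv, d, hd1, hd9, rfl, hxn, hxp⟩
        obtain ⟨hv0, hGRv, hlenv⟩ := (ihrf v).mp hv
        have hv1 : 1 ≤ v := pvGR_pos n v hv0 hGRv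
        have hx0 : 0 ≤ 10 * v + d := by omega
        have hsplit := pvDigs_snoc _ v d hv1 (by omega) (by omega) rfl
        have hlenx : (pvDigs (10 * v + d)).length = t + 2 := by
          rw [hsplit, List.length_append, hlenv]
          simp
        refine ⟨hx0, ?_, hlenx⟩
        rw [pvGR_step n _ (t+1) (by omega) hx0 hlenx]
        exact ⟨hxn, (pvIsPrime_iff _).mp hxp, d, v, hd1, hd9, hv0, hlenv, hGRv, rfl⟩
      · rintro ⟨hx0, hGRx, hlenx⟩
        obtain ⟨hxn, hxpz, d, v, hd1, hd9, hv0, hlenv, hGRv, hxe⟩ :=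
          (pvGR_step n x (t+1) (by omega) hx0 hlenx).mp hGRx
        exact ⟨v, (ihrf v).mpr ⟨hv0, hGRv, hlenv⟩, d, hd1, hd9, hxe,
          hxn, (pvIsPrime_iff x).mpr hxpz⟩
    refine ⟨?_, ?_, ?_, ?_, ?_⟩
    · show (pvLoop n st (t:Int)).2.2.2.2 = (10:Int) ^ (t + 1 + 1)
      rw [pvLoop]
      show st.2.2.2.2 * 10 = (10:Int) ^ (t + 1 + 1)
      rw [ihpw]
      ring
    · intro x
      show x ∈ (pvLoop n st (t:Int)).1 ↔ _
      rw [pvLoop]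
      show x ∈ pvGrowL n st.2.2.2.2 st.1 ↔ _
      rw [hlfmem x]
    · intro x
      show x ∈ (pvLoop n st (t:Int)).2.1 ↔ _
      rw [pvLoop]
      show x ∈ pvGrowR n st.2.1 ↔ _
      rw [hrfmem x]
    · intro x
      show x ∈ (pvLoop n st (t:Int)).2.2.1 ↔ _
      rw [pvLoop]
      show x ∈ st.2.2.1 ++ pvGrowL n st.2.2.2.2 st.1 ↔ _
      rw [List.mem_append, ihleft x, hlfmem x]
      constructor
      · rintro (⟨h0, hG, hl⟩ | ⟨h0, hG, hl⟩)
        · exact ⟨h0, hG, by omega⟩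
        · exact ⟨h0, hG, by omega⟩
      · rintro ⟨h0, hG, hl⟩
        by_cases hc : (pvDigs x).length ≤ t + 1
        · exact Or.inl ⟨h0, hG, hc⟩
        · exact Or.inr ⟨h0, hG, by omega⟩
    · intro x
      show x ∈ (pvLoop n st (t:Int)).2.2.2.1 ↔ _
      rw [pvLoop]
      show x ∈ st.2.2.2.1 ++ pvGrowR n st.2.1 ↔ _
      rw [List.mem_append, ihright x, hrfmem x]
      constructor
      · rintro (⟨h0, hG, hl⟩ | ⟨h0, hG, hl⟩)
        · exact ⟨h0, hG, by omega⟩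
        · exact ⟨h0, hG, by omega⟩
      · rintro ⟨h0, hG, hl⟩
        by_cases hc : (pvDigs x).length ≤ t + 1
        · exact Or.inl ⟨h0, hG, hc⟩
        · exact Or.inr ⟨h0, hG, by omega⟩

theorem pvGL_primeIn (n x : Int) (h : pvGL n x) : pvPrimeIn n x := by
  obtain ⟨h0, hh⟩ := h
  obtain ⟨q, hq0, hqin, hqd⟩ := hh 0 (by rw [pvDigs]; exact Nat.length_toDigits_pos)
  rw [List.drop_zero] at hqd
  rwa [pvDigs_inj q x hq0 h0 hqd] at hqin

theorem pvGR_primeIn (n x : Int) (h : pvGR n x) : pvPrimeIn n x := by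
  obtain ⟨h0, hh⟩ := h
  have hlenpos : 0 < (pvDigs x).length := by rw [pvDigs]; exact Nat.length_toDigits_pos
  obtain ⟨q, hq0, hqin, hqd⟩ := hh ((pvDigs x).length - 1) (by omega)
  rw [show (pvDigs x).length - 1 + 1 = (pvDigs x).length by omega,
    List.take_of_length_le le_rfl] at hqd
  rwa [pvDigs_inj q x hq0 h0 hqd] at hqin

theorem pvGL_two (n : Int) (hn : 2 ≤ n) : pvGL n 2 := by
  have hlen : (pvDigs (2:Int)).length = 1 := by decide
  exact (pvGL_single n 2 (by norm_num) hlen).mpr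
    ⟨hn, (pvPz_single 2 (by norm_num) (by norm_num)).mpr (by norm_num)⟩

theorem pvGR_two (n : Int) (hn : 2 ≤ n) : pvGR n 2 := by
  have hlen : (pvDigs (2:Int)).length = 1 := by decide
  exact (pvGR_single n 2 (by norm_num) hlen).mpr
    ⟨hn, (pvPz_single 2 (by norm_num) (by norm_num)).mpr (by norm_num)⟩

theorem pvLen_mono (n x : Int) (h0 : 0 ≤ x) (hn : 2 ≤ n) (hle : x ≤ n) :
    (pvDigs x).length ≤ (pvDigs n).length := by
  have hD1 : 1 ≤ (pvDigs n).length := by rw [pvDigs]; exact Nat.length_toDigits_pos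
  have hnlt : n.toNat < 10 ^ (pvDigs n).length :=
    (Nat.length_toDigits_le_iff (by norm_num) (by omega)).mp le_rfl
  rw [pvDigs]
  exact (Nat.length_toDigits_le_iff (by norm_num) (by omega)).mpr (by omega)

theorem pvPrimes_desc (n : Int) : ((pvPrimes n).reverse).Pairwise (fun a b => b < a) := by
  rw [List.pairwise_reverse, pvPrimes_eq]
  exact List.Pairwise.filter _ (PySem.List.pairwise_lt_pyRange_one 2 (n+1))

theorem pvMain (n : Int) (hn : 2 ≤ n) : truncatableprime n = truncatableprime_alt n := by
  obtain ⟨gL, ⟨hgL0, hgLGL⟩, hgLmax⟩ :=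
    Int.exists_greatest_of_bdd (P := fun x => 0 ≤ x ∧ pvGL n x)
      ⟨n, fun z hz => (pvGL_primeIn n z hz.2).1⟩ ⟨2, by norm_num, pvGL_two n hn⟩
  obtain ⟨gR, ⟨hgR0, hgRGR⟩, hgRmax⟩ :=
    Int.exists_greatest_of_bdd (P := fun x => 0 ≤ x ∧ pvGR n x)
      ⟨n, fun z hz => (pvGR_primeIn n z hz.2).1⟩ ⟨2, by norm_num, pvGR_two n hn⟩
  -- A side
  have hlist : ((PySem.List.slice? (pvPrimes n) none none (-1)).getD []).map PySem.Int.toStr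
      = pvPrimeStrs n := by
    rw [PySem.List.slice?_none_none_neg_one]
    rfl
  have hposmem : ∀ p ∈ (pvPrimes n).reverse, 0 ≤ p := by
    intro p hp
    rw [List.mem_reverse, pvPrimes_mem] at hp
    have := hp.2.1
    omega
  have hcondL : ∀ p ∈ (pvPrimes n).reverse,
      (pvCondL (PySem.Int.toStr p) (PySem.Set.ofList (pvPrimeStrs n)) = true ↔ pvGL n p) := by
    intro p hp
    rw [pvCondL_iff n p (hposmem p hp)]
    constructor
    · intro h; exact ⟨hposmem p hp, h⟩
    · intro h; exact h.2
  have hcondR : ∀ p ∈ (pvPrimes n).reverse,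
      (pvCondR (PySem.Int.toStr p) (PySem.Set.ofList (pvPrimeStrs n)) = true ↔ pvGR n p) := by
    intro p hp
    rw [pvCondR_iff n p (hposmem p hp)]
    constructor
    · intro h; exact ⟨hposmem p hp, h⟩
    · intro h; exact h.2
  have hgLmem : gL ∈ (pvPrimes n).reverse := by
    rw [List.mem_reverse, pvPrimes_mem]
    have := pvGL_primeIn n gL hgLGL
    exact ⟨this.1, this.2⟩
  have hgRmem : gR ∈ (pvPrimes n).reverse := by
    rw [List.mem_reverse, pvPrimes_mem]
    have := pvGR_primeIn n gR hgRGR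
    exact ⟨this.1, this.2⟩
  have hscanL : pvScanL (pvPrimeStrs n) (PySem.Set.ofList (pvPrimeStrs n)) = gL :=
    pvScanL_spec (PySem.Set.ofList (pvPrimeStrs n)) (pvGL n) gL (pvPrimes n).reverse
      (pvPrimes_desc n) hposmem hgLmem hcondL hgLGL
      (fun p hp hq => hgLmax p ⟨hposmem p hp, hq⟩)
  have hscanR : pvScanR (pvPrimeStrs n) (PySem.Set.ofList (pvPrimeStrs n)) = gR :=
    pvScanR_spec (PySem.Set.ofList (pvPrimeStrs n)) (pvGR n) gR (pvPrimes n).reverse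
      (pvPrimes_desc n) hposmem hgRmem hcondR hgRGR
      (fun p hp hq => hgRmax p ⟨hposmem p hp, hq⟩)
  have hA : truncatableprime n = [gL, gR] := by
    show [pvScanL _ _, pvScanR _ _] = [gL, gR]
    rw [hlist, hscanL, hscanR]
  -- B side
  have hD1 : 1 ≤ (pvDigs n).length := by rw [pvDigs]; exact Nat.length_toDigits_pos
  have hbound : PySem.Str.len (PySem.Int.toStr n) - 1 = (((pvDigs n).length - 1 : Nat) : Int) := by
    rw [PySem.Str.len_eq, PySem.Int.toList_toStr, pvToChars_eq n (by omega)]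
    omega
  obtain ⟨hpw, hlf, hrf, hleft, hright⟩ := pvLoop_inv n ((pvDigs n).length - 1)
  have hDfix : (pvDigs n).length - 1 + 1 = (pvDigs n).length := by omega
  rw [hDfix] at hleft hright
  have hleft' : ∀ x, x ∈ ((PySem.List.pyRange 0 (((pvDigs n).length - 1 : Nat) : Int) 1).foldl
      (pvLoop n) ([2, 3, 5, 7].filter (fun p => decide (p ≤ n)),
        [2, 3, 5, 7].filter (fun p => decide (p ≤ n)),
        [2, 3, 5, 7].filter (fun p => decide (p ≤ n)),
        [2, 3, 5, 7].filter (fun p => decide (p ≤ n)), 10)).2.2.1 ↔ 0 ≤ x ∧ pvGL n x := by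
    intro x
    rw [hleft x]
    constructor
    · rintro ⟨h0, hG, _⟩; exact ⟨h0, hG⟩
    · rintro ⟨h0, hG⟩
      exact ⟨h0, hG, pvLen_mono n x h0 hn (pvGL_primeIn n x hG).1⟩
  have hright' : ∀ x, x ∈ ((PySem.List.pyRange 0 (((pvDigs n).length - 1 : Nat) : Int) 1).foldl
      (pvLoop n) ([2, 3, 5, 7].filter (fun p => decide (p ≤ n)),
        [2, 3, 5, 7].filter (fun p => decide (p ≤ n)),
        [2, 3, 5, 7].filter (fun p => decide (p ≤ n)),
        [2, 3, 5, 7].filter (fun p => decide (p ≤ n)), 10)).2.2.2.1 ↔ 0 ≤ x ∧ pvGR n x := by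
    intro x
    rw [hright x]
    constructor
    · rintro ⟨h0, hG, _⟩; exact ⟨h0, hG⟩
    · rintro ⟨h0, hG⟩
      exact ⟨h0, hG, pvLen_mono n x h0 hn (pvGR_primeIn n x hG).1⟩
  have hB : truncatableprime_alt n = [gL, gR] := by
    show [(PySem.List.max? _ (fun v => v)).getD 0, (PySem.List.max? _ (fun v => v)).getD 0]
        = [gL, gR]
    rw [hbound]
    congr 1
    · -- left component
      cases hmq : PySem.List.max? _ (fun v : Int => v) with
      | none =>
        rw [PySem.List.max?_eq_none_iff] at hmq
        exact absurd ((hleft' gL).mpr ⟨hgL0, hgLGL⟩) (by rw [hmq]; simp)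
      | some m =>
        have hmem := PySem.List.max?_mem hmq
        have hmax := PySem.List.max?_isMax hmq
        have h1 : m ≤ gL := hgLmax m ((hleft' m).mp hmem)
        have h2 : gL ≤ m := hmax gL ((hleft' gL).mpr ⟨hgL0, hgLGL⟩)
        simp [show m = gL by omega]
    · congr 1
      cases hmq : PySem.List.max? _ (fun v : Int => v) with
      | none =>
        rw [PySem.List.max?_eq_none_iff] at hmq
        exact absurd ((hright' gR).mpr ⟨hgR0, hgRGR⟩) (by rw [hmq]; simp)
      | some m =>
        have hmem := PySem.List.max?_mem hmq
        have hmax := PySem.List.max?_isMax hmq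
        have h1 : m ≤ gR := hgRmax m ((hright' m).mp hmem)
        have h2 : gR ≤ m := hmax gR ((hright' gR).mpr ⟨hgR0, hgRGR⟩)
        simp [show m = gR by omega]
  rw [hA, hB]

-- ===== VERDICT =====
theorem truncatableprime_spec : Claim_equal_truncatableprime := by
  intro n _ hpre
  show truncatableprime n = truncatableprime_alt n
  exact pvMain n hpre
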